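-- pv_equiv track=rewrite | github.com/mohammadfaiizan/ProjectI | DSA/Theory/Dynamic_Programming/004_dp_knapsack_unbounded.py | unbounded_knapsack_min_items
-- ===== SOURCE A (Python) =====
-- from typing import List, Dict, Tuple, Optional
--
-- def unbounded_knapsack_min_items(weights: List[int], capacity: int) -> int:
--     """
--     Find minimum number of items to exactly fill capacity
--
--     Args:
--         weights: Item weights (values are all 1)
--         capacity: Target capacity to fill exactly
--
--     Returns:
--         Minimum items needed, -1 if impossible
--     """
--     dp = [float('inf')] * (capacity + 1)
--     dp[0] = 0
--
--     for w in range(1, capacity + 1):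
--         for weight in weights:
--             if weight <= w:
--                 dp[w] = min(dp[w], dp[w - weight] + 1)
--
--     return dp[capacity] if dp[capacity] != float('inf') else -1
-- ===== SOURCE B (Python) =====
-- def unbounded_knapsack_min_items(weights, capacity):
--     """
--     Find minimum number of items to exactly fill capacity
--
--     BFS on capacities 0..capacity: each positive weight is a unit-cost edge,
--     explored level by level; the level at which `capacity` appears is the answer.
--     """
--     if capacity < 0:
--         return -1
--     seen = [False] * (capacity + 1)
--     seen[0] = True
--     frontier = [0]
--     steps = 0
--     while frontier:
--         if capacity in frontier:
--             return steps
--         nxt = []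
--         for s in frontier:
--             for w in weights:
--                 t = s + w
--                 if 0 < w and t <= capacity and not seen[t]:
--                     seen[t] = True
--                     nxt.append(t)
--         frontier = nxt
--         steps += 1
--     return -1
-- ===== Notes on version B (the rewrite author's own statement) =====
-- stated objective: alternative
-- what changed: Replaces the bottom-up tabulated min-DP over all capacities 0..capacity with a level-synchronous BFS (unit-cost shortest path over reachable capacities) that visits each reachable capacity once and stops as soon as the target level is reached.
import Mathlib
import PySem

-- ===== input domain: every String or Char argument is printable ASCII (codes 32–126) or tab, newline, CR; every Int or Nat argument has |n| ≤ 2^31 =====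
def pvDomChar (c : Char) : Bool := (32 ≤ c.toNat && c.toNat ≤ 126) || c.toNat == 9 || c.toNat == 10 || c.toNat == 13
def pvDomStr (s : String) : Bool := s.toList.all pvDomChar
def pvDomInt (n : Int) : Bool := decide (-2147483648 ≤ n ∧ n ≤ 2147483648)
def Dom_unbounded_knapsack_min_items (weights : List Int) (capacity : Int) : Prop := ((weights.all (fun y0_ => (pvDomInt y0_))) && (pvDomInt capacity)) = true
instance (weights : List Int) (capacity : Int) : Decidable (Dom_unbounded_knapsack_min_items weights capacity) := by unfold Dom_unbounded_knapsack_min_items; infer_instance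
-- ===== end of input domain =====

-- B replaces the bottom-up min DP by a level-synchronous BFS over capacities (unit-cost edges); objective: alternative algorithm.

-- ===== PORT A =====
-- float('inf') in the dp array is modelled as `none` (Option Int); `omin`/`oplus1` are
-- min and (+1) with none = infinity — exact, since inf is only compared/min'd/+1'd here.
def omin : Option Int → Option Int → Option Int
  | none, y => y
  | some a, none => some a
  | some a, some b => some (min a b)

def oplus1 : Option Int → Option Int
  | none => none
  | some a => some (a + 1)

-- dp is a Python list of numbers indexed by 0..capacity: modelled as Array (Option Int)
-- (none = float('inf')). aGetD/aSetD are Python dp[i] / dp[i] = v, exact for the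
-- nonnegative in-range indices this code uses on every input admitted by Pre_.
def aGetD (dp : Array (Option Int)) (i : Int) : Option Int :=
  if 0 ≤ i then dp.getD i.toNat none else none

def aSetD (dp : Array (Option Int)) (i : Int) (v : Option Int) : Array (Option Int) :=
  if 0 ≤ i then dp.setIfInBounds i.toNat v else dp

def unbounded_knapsack_min_items (weights : List Int) (capacity : Int) : Int :=
  let dp0 := aSetD (Array.replicate (capacity + 1).toNat (none : Option Int)) 0 (some 0)
  let dp :=
    (PySem.List.pyRange 1 (capacity + 1) 1).foldl (fun dp w =>
      weights.foldl (fun dp weight =>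
        if weight ≤ w then
          aSetD dp w (omin (aGetD dp w) (oplus1 (aGetD dp (w - weight))))
        else dp) dp) dp0
  match aGetD dp capacity with
  | some v => v
  | none => -1

-- ===== PORT B =====
-- seen is Python's boolean list (Array Bool); nxt is accumulated by cons and reversed
-- when it becomes the next frontier, so each frontier is exactly Python's nxt in
-- append order. One BFS level:
def pvBfsStep (weights : List Int) (capacity : Int)
    (seen : Array Bool) (frontier : List Int) : Array Bool × List Int :=
  frontier.foldl (fun acc s =>
    weights.foldl (fun acc w =>
      if 0 < w ∧ s + w ≤ capacity ∧ acc.1.getD (s + w).toNat false = false then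
        (acc.1.setIfInBounds (s + w).toNat true, (s + w) :: acc.2)
      else acc) acc) (seen, ([] : List Int))

-- the while-loop; fuel only makes it total (capacity.toNat + 2 iterations always
-- suffice: BFS levels are bounded by capacity, proved below)
def pvBfsLoop (weights : List Int) (capacity : Int) :
    Nat → Array Bool → List Int → Int → Int
  | 0, _, _, _ => -1
  | Nat.succ fuel, seen, frontier, steps =>
    if frontier.isEmpty then -1
    else if frontier.contains capacity then steps
    else
      let r := pvBfsStep weights capacity seen frontier
      pvBfsLoop weights capacity fuel r.1 r.2.reverse (steps + 1)

def unbounded_knapsack_min_items_alt (weights : List Int) (capacity : Int) : Int :=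
  if capacity < 0 then -1
  else
    pvBfsLoop weights capacity (capacity.toNat + 2)
      ((Array.replicate (capacity.toNat + 1) false).setIfInBounds 0 true) [0] 0

-- ===== PRECONDITION & SPEC =====
-- Pre_ excludes exactly the inputs on which A raises IndexError: negative capacity
-- (dp[0] on an empty list), and a negative weight with capacity ≥ 1 (dp[w - weight]
-- indexes past the end of dp).
def Pre_unbounded_knapsack_min_items (weights : List Int) (capacity : Int) : Prop :=
  0 ≤ capacity ∧ (capacity = 0 ∨ ∀ w ∈ weights, 0 ≤ w)

instance (weights : List Int) (capacity : Int) :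
    Decidable (Pre_unbounded_knapsack_min_items weights capacity) := by
  unfold Pre_unbounded_knapsack_min_items; infer_instance

def pvWitness_unbounded_knapsack_min_items : List Int × Int := ([2, 3], 7)

def Spec_unbounded_knapsack_min_items (weights : List Int) (capacity : Int) (out : Int) : Prop :=
  out = unbounded_knapsack_min_items_alt weights capacity
instance (weights : List Int) (capacity : Int) (out : Int) : Decidable (Spec_unbounded_knapsack_min_items weights capacity out) := by unfold Spec_unbounded_knapsack_min_items; infer_instance

-- ===== CLAIM (what is proved, stated in full; the proofs are below) =====
def Claim_equal_unbounded_knapsack_min_items : Prop := ∀ (weights : List Int) (capacity : Int), Dom_unbounded_knapsack_min_items weights capacity → Pre_unbounded_knapsack_min_items weights capacity → Spec_unbounded_knapsack_min_items weights capacity (unbounded_knapsack_min_items weights capacity)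

-- ===== LEMMAS AND PROOFS =====

-- `Reach weights c k`: capacity c is the sum of exactly k positive weights from `weights`.
inductive Reach (weights : List Int) : Int → Nat → Prop
  | zero : Reach weights 0 0
  | step {c : Int} {k : Nat} {w : Int} :
      Reach weights c k → w ∈ weights → 0 < w → Reach weights (c + w) (k + 1)

-- `Level weights c k`: k is the least number of items summing to c.
def Level (weights : List Int) (c : Int) (k : Nat) : Prop :=
  Reach weights c k ∧ ∀ j, Reach weights c j → k ≤ j


-- ---------- basic facts about Reach / Level ----------

theorem reach_nonneg {W : List Int} {c : Int} {k : Nat} (h : Reach W c k) : 0 ≤ c := by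
  induction h with
  | zero => omega
  | step _ _ hw ih => omega

theorem reach_le {W : List Int} {c : Int} {k : Nat} (h : Reach W c k) : (k : Int) ≤ c := by
  induction h with
  | zero => simp
  | step _ _ hw ih => push_cast; omega

theorem reach_zero_iff {W : List Int} {c : Int} : Reach W c 0 ↔ c = 0 := by
  constructor
  · intro h; cases h; rfl
  · rintro rfl; exact Reach.zero

theorem reach_succ_iff {W : List Int} {c : Int} {k : Nat} :
    Reach W c (k + 1) ↔ ∃ w ∈ W, 0 < w ∧ Reach W (c - w) k := by
  constructor
  · intro h
    cases h with
    | step hr hw hpos => exact ⟨_, hw, hpos, by simpa using hr⟩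
  · rintro ⟨w, hw, hpos, hr⟩
    have := Reach.step hr hw hpos
    simpa using this

theorem exists_level {W : List Int} {c : Int} (h : ∃ k, Reach W c k) :
    ∃ k, Level W c k := by
  refine ⟨sInf {k | Reach W c k}, Nat.sInf_mem h, fun j hj => Nat.sInf_le hj⟩

theorem level_unique {W : List Int} {c : Int} {k k' : Nat}
    (h : Level W c k) (h' : Level W c k') : k = k' :=
  le_antisymm (h.2 _ h'.1) (h'.2 _ h.1)

theorem level_zero {W : List Int} : Level W 0 0 :=
  ⟨Reach.zero, fun _ _ => Nat.zero_le _⟩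

theorem level_zero_iff {W : List Int} {c : Int} : Level W c 0 ↔ c = 0 := by
  constructor
  · intro h; exact reach_zero_iff.mp h.1
  · rintro rfl; exact level_zero

theorem level_pred {W : List Int} {c : Int} {k : Nat} (h : Level W c (k + 1)) :
    ∃ w ∈ W, 0 < w ∧ Level W (c - w) k := by
  obtain ⟨w, hw, hpos, hr⟩ := reach_succ_iff.mp h.1
  obtain ⟨j, hj⟩ := exists_level ⟨k, hr⟩
  have hjk : j ≤ k := hj.2 _ hr
  have : Reach W c (j + 1) := reach_succ_iff.mpr ⟨w, hw, hpos, hj.1⟩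
  have : k + 1 ≤ j + 1 := h.2 _ this
  have : j = k := by omega
  exact ⟨w, hw, hpos, this ▸ hj⟩

-- ---------- small helpers on Option-as-infinity and List.getD/set ----------

theorem omin_self_oplus1 (a : Option Int) : omin a (oplus1 a) = a := by
  cases a with
  | none => rfl
  | some v => simp [omin, oplus1]

theorem omin_eq_none_iff (a b : Option Int) : omin a b = none ↔ a = none ∧ b = none := by
  cases a <;> cases b <;> simp [omin]

theorem oplus1_eq_none_iff (a : Option Int) : oplus1 a = none ↔ a = none := by
  cases a <;> simp [oplus1]

theorem getD_set_self {α : Type} (l : List α) (i : Nat) (h : i < l.length) (a d : α) :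
    (l.set i a).getD i d = a := by
  simp [List.getD, h]

theorem getD_set_ne {α : Type} (l : List α) {i j : Nat} (h : i ≠ j) (a d : α) :
    (l.set i a).getD j d = l.getD j d := by
  simp [List.getD, List.getElem?_set_ne h]

theorem set_self_of_getD {α : Type} (l : List α) (i : Nat) (d : α)
    (h : l.getD i d = d) : l.set i d = l := by
  apply List.ext_getElem?
  intro n
  rcases eq_or_ne n i with rfl | hne
  · rcases Nat.lt_or_ge n l.length with hlt | hge
    · have : l[n]?.getD d = d := h
      have hg : l[n]? = some l[n] := List.getElem?_eq_getElem hlt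
      rw [List.getElem?_set_self', hg]
      simp only [hg, Option.getD_some] at this
      simp [this]
    · simp [List.getElem?_eq_none hge, List.getElem?_set]
      omega
  · rw [List.getElem?_set_ne (by omega)]

-- ---------- A side: the inner fold over weights ----------

-- the port's inner loop body, for the outer index c
def innerStepA (c : Int) (dp : List (Option Int)) (weight : Int) : List (Option Int) :=
  if weight ≤ c then
    dp.set c.toNat (omin (dp.getD c.toNat none) (oplus1 (dp.getD (c - weight).toNat none)))
  else dp

-- the abstract value-level fold the inner loop computes at index c
def partialMin (c : Int) (dp : List (Option Int)) (acc : Option Int) (l : List Int) : Option Int :=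
  l.foldl (fun a w =>
    if 0 < w ∧ w ≤ c then omin a (oplus1 (dp.getD (c - w).toNat none)) else a) acc

theorem innerFold_eq (c : Int) (dp : List (Option Int))
    (hc0 : 0 < c) (hct : c.toNat < dp.length) :
    ∀ (l : List Int) (acc : Option Int), (∀ w ∈ l, 0 ≤ w) →
    l.foldl (innerStepA c) (dp.set c.toNat acc)
      = dp.set c.toNat (partialMin c dp acc l) := by
  intro l
  induction l with
  | nil => intro acc _; rfl
  | cons w l ih =>
    intro acc hnn
    have hw0 : 0 ≤ w := hnn w (by simp)
    simp only [List.foldl_cons, partialMin]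
    by_cases hcond : w ≤ c
    · have hstep : innerStepA c (dp.set c.toNat acc) w
          = dp.set c.toNat (if 0 < w ∧ w ≤ c then omin acc (oplus1 (dp.getD (c - w).toNat none)) else acc) := by
        unfold innerStepA
        rw [if_pos hcond]
        rw [List.set_set]
        rw [getD_set_self _ _ hct _ _]
        rcases eq_or_lt_of_le hw0 with rfl | hwpos
        · simp only [sub_zero]
          rw [getD_set_self _ _ hct _ _]
          simp [omin_self_oplus1]
        · rw [getD_set_ne _ (by omega : c.toNat ≠ (c - w).toNat) _ _]
          rw [if_pos ⟨hwpos, hcond⟩]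
      rw [hstep, ih _ (fun x hx => hnn x (by simp [hx]))]
      rfl
    · have hno : ¬ (0 < w ∧ w ≤ c) := fun h => hcond h.2
      rw [if_neg hno]
      have hid : innerStepA c (dp.set c.toNat acc) w = dp.set c.toNat acc := by
        unfold innerStepA; rw [if_neg hcond]
      rw [hid, ih _ (fun x hx => hnn x (by simp [hx]))]
      rfl

-- value-level characterisation of partialMin
theorem partialMin_none_iff (c : Int) (dp : List (Option Int)) :
    ∀ (l : List Int) (acc : Option Int),
    (partialMin c dp acc l = none ↔
      acc = none ∧ ∀ w ∈ l, 0 < w → w ≤ c → dp.getD (c - w).toNat none = none) := by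
  intro l
  induction l with
  | nil => intro acc; simp [partialMin]
  | cons w l ih =>
    intro acc
    simp only [partialMin, List.foldl_cons]
    by_cases h : 0 < w ∧ w ≤ c
    · rw [if_pos h]
      rw [show (List.foldl _ (omin acc (oplus1 (dp.getD (c - w).toNat none))) l)
          = partialMin c dp (omin acc (oplus1 (dp.getD (c - w).toNat none))) l from rfl]
      rw [ih]
      rw [omin_eq_none_iff, oplus1_eq_none_iff]
      constructor
      · rintro ⟨⟨ha, hb⟩, hrest⟩
        refine ⟨ha, ?_⟩
        intro x hx hx1 hx2
        rcases List.mem_cons.mp hx with rfl | hx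
        · exact hb
        · exact hrest x hx hx1 hx2
      · rintro ⟨ha, hall⟩
        exact ⟨⟨ha, hall w (by simp) h.1 h.2⟩, fun x hx => hall x (by simp [hx])⟩
    · rw [if_neg h]
      rw [show (List.foldl _ acc l) = partialMin c dp acc l from rfl, ih]
      constructor
      · rintro ⟨ha, hrest⟩
        refine ⟨ha, ?_⟩
        intro x hx hx1 hx2
        rcases List.mem_cons.mp hx with rfl | hx
        · exact absurd ⟨hx1, hx2⟩ h
        · exact hrest x hx hx1 hx2
      · rintro ⟨ha, hall⟩
        exact ⟨ha, fun x hx => hall x (by simp [hx])⟩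

theorem partialMin_attained (c : Int) (dp : List (Option Int)) :
    ∀ (l : List Int) (acc : Option Int) (v : Int),
    partialMin c dp acc l = some v →
    acc = some v ∨ ∃ w ∈ l, 0 < w ∧ w ≤ c ∧ ∃ u, dp.getD (c - w).toNat none = some u ∧ v = u + 1 := by
  intro l
  induction l with
  | nil => intro acc v h; left; exact h
  | cons w l ih =>
    intro acc v h
    simp only [partialMin, List.foldl_cons] at h
    by_cases hcond : 0 < w ∧ w ≤ c
    · rw [if_pos hcond] at h
      rcases ih _ _ h with hacc | ⟨x, hx, h1, h2, u, hu, hv⟩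
      · -- omin acc (oplus1 d) = some v
        cases hd : dp.getD (c - w).toNat none with
        | none =>
          rw [hd] at hacc
          cases acc with
          | none => simp [omin, oplus1] at hacc
          | some a =>
            left
            simp only [omin, oplus1] at hacc
            exact hacc
        | some u =>
          rw [hd] at hacc
          cases acc with
          | none =>
            right
            refine ⟨w, by simp, hcond.1, hcond.2, u, hd, ?_⟩
            simp only [omin, oplus1, Option.some.injEq] at hacc
            omega
          | some a =>
            simp only [omin, oplus1, Option.some.injEq] at hacc
            rcases le_total a (u + 1) with hle | hlt
            · left
              simp only [Option.some.injEq]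
              omega
            · right
              refine ⟨w, by simp, hcond.1, hcond.2, u, hd, ?_⟩
              omega
      · right; exact ⟨x, by simp [hx], h1, h2, u, hu, hv⟩
    · rw [if_neg hcond] at h
      rcases ih _ _ h with hacc | ⟨x, hx, h1, h2, u, hu, hv⟩
      · left; exact hacc
      · right; exact ⟨x, by simp [hx], h1, h2, u, hu, hv⟩

theorem partialMin_lb (c : Int) (dp : List (Option Int)) :
    ∀ (l : List Int) (acc : Option Int) (v : Int),
    partialMin c dp acc l = some v →
    (∀ a, acc = some a → v ≤ a) ∧
    (∀ w ∈ l, 0 < w → w ≤ c → ∀ u, dp.getD (c - w).toNat none = some u → v ≤ u + 1) := by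
  intro l
  induction l with
  | nil =>
    intro acc v h
    refine ⟨fun a ha => ?_, by simp⟩
    rw [ha] at h
    simp only [partialMin, List.foldl_nil, Option.some.injEq] at h
    omega
  | cons w l ih =>
    intro acc v h
    simp only [partialMin, List.foldl_cons] at h
    by_cases hcond : 0 < w ∧ w ≤ c
    · rw [if_pos hcond] at h
      obtain ⟨hacc', hrest⟩ := ih _ _ h
      have hself : ∀ u, dp.getD (c - w).toNat none = some u → v ≤ u + 1 := by
        intro u hu
        cases acc with
        | none =>
          have he : omin none (oplus1 (dp.getD (c - w).toNat none)) = some (u + 1) := by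
            rw [hu]; rfl
          have := hacc' (u + 1) he
          omega
        | some a =>
          have he : omin (some a) (oplus1 (dp.getD (c - w).toNat none)) = some (min a (u + 1)) := by
            rw [hu]; rfl
          have := hacc' (min a (u + 1)) he
          omega
      refine ⟨?_, ?_⟩
      · intro a ha
        subst ha
        cases hd : dp.getD (c - w).toNat none with
        | none =>
          have he : omin (some a) (oplus1 (dp.getD (c - w).toNat none)) = some a := by
            rw [hd]; rfl
          have := hacc' a he
          omega
        | some u =>
          have he : omin (some a) (oplus1 (dp.getD (c - w).toNat none)) = some (min a (u + 1)) := by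
            rw [hd]; rfl
          have := hacc' (min a (u + 1)) he
          omega
      · intro x hx hx1 hx2 u hu
        rcases List.mem_cons.mp hx with rfl | hx
        · exact hself u hu
        · exact hrest x hx hx1 hx2 u hu
    · rw [if_neg hcond] at h
      obtain ⟨hacc', hrest⟩ := ih _ _ h
      refine ⟨hacc', ?_⟩
      intro x hx hx1 hx2 u hu
      rcases List.mem_cons.mp hx with rfl | hx
      · exact absurd ⟨hx1, hx2⟩ hcond
      · exact hrest x hx hx1 hx2 u hu

-- the cell value the DP should hold at index c
def OKo (W : List Int) (o : Option Int) (c : Int) : Prop :=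
  (o = none ∧ ∀ k, ¬ Reach W c k) ∨ (∃ k, Level W c k ∧ o = some (k : Int))

theorem partialMin_OKo {W : List Int} {c : Int} {dp : List (Option Int)}
    (hc0 : 0 < c)
    (ih : ∀ v : Int, 0 ≤ v → v < c → OKo W (dp.getD v.toNat none) v) :
    OKo W (partialMin c dp none W) c := by
  cases hres : partialMin c dp none W with
  | none =>
    left
    refine ⟨rfl, ?_⟩
    have hall := (partialMin_none_iff c dp W none).mp hres
    intro k hk
    cases k with
    | zero => exact absurd (reach_zero_iff.mp hk) (by omega)
    | succ k =>
      obtain ⟨w, hw, hpos, hr⟩ := reach_succ_iff.mp hk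
      have hnn : 0 ≤ c - w := reach_nonneg hr
      have hnone := hall.2 w hw hpos (by omega)
      rcases ih (c - w) hnn (by omega) with ⟨hN, hnr⟩ | ⟨k', hk', hs⟩
      · exact hnr k hr
      · rw [hnone] at hs; simp at hs
  | some v =>
    right
    rcases partialMin_attained c dp W none v hres with hacc | ⟨w, hw, hpos, hwc, u, hu, hv⟩
    · simp at hacc
    · have hnn : (0:Int) ≤ c - w := by omega
      rcases ih (c - w) hnn (by omega) with ⟨hN, _⟩ | ⟨k, hk, hs⟩
      · rw [hN] at hu; simp at hu
      · rw [hs] at hu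
        have huk : u = (k : Int) := by injection hu with h; omega
        have hreach : Reach W c (k + 1) := reach_succ_iff.mpr ⟨w, hw, hpos, hk.1⟩
        refine ⟨k + 1, ⟨hreach, ?_⟩, by simp only [Option.some.injEq]; push_cast; omega⟩
        intro j hj
        cases j with
        | zero => exact absurd (reach_zero_iff.mp hj) (by omega)
        | succ j =>
          obtain ⟨w', hw', hpos', hr'⟩ := reach_succ_iff.mp hj
          have hnn' : 0 ≤ c - w' := reach_nonneg hr'
          rcases ih (c - w') hnn' (by omega) with ⟨_, hnr'⟩ | ⟨k0, hk0, hs0⟩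
          · exact absurd hr' (hnr' j)
          · have hk0j : k0 ≤ j := hk0.2 _ hr'
            have hlb := (partialMin_lb c dp W none v hres).2 w' hw' hpos' (by omega)
              (k0 : Int) hs0
            omega

-- ---------- A side: the outer loop ----------

def outerStepA (weights : List Int)
    (dp : List (Option Int)) (w : Int) : List (Option Int) :=
  weights.foldl (innerStepA w) dp

def dpInitL (capacity : Int) : List (Option Int) :=
  (List.replicate (capacity + 1).toNat (none : Option Int)).set 0 (some 0)

theorem outer_invariant {W : List Int} {capacity : Int}
    (hcap : 0 ≤ capacity) (hW : ∀ w ∈ W, 0 ≤ w) :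
    ∀ n : Nat, n ≤ capacity.toNat →
    let dpn := (PySem.List.pyRange 1 ((n : Int) + 1) 1).foldl (outerStepA W) (dpInitL capacity)
    dpn.length = capacity.toNat + 1 ∧
    (∀ v : Nat, v ≤ n → OKo W (dpn.getD v none) (v : Int)) ∧
    (∀ v : Nat, n < v → dpn.getD v none = none) := by
  intro n
  induction n with
  | zero =>
    intro _
    rw [PySem.List.pyRange_one_eq_nil (by omega)]
    simp only [List.foldl_nil]
    unfold dpInitL
    have hlenr : (List.replicate (capacity + 1).toNat (none : Option Int)).length
        = (capacity + 1).toNat := by simp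
    refine ⟨by simp; omega, ?_, ?_⟩
    · intro v hv
      have hv0 : v = 0 := by omega
      subst hv0
      right
      refine ⟨0, level_zero, ?_⟩
      rw [getD_set_self _ _ (by simp; omega) _ _]
      simp
    · intro v hv
      rw [getD_set_ne _ (by omega) _ _]
      rcases Nat.lt_or_ge v (capacity + 1).toNat with hlt | hge
      · simp [List.getD, hlt]
      · have hle : (List.replicate (capacity + 1).toNat (none : Option Int)).length ≤ v := by
          simpa using hge
        simp [List.getD, List.getElem?_eq_none hle]
  | succ n ih =>
    intro hn
    have hn' : n ≤ capacity.toNat := by omega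
    obtain ⟨hlen, hok, hnone⟩ := ih hn'
    rw [show (((n + 1 : Nat) : Int) + 1) = ((n : Int) + 1) + 1 by push_cast; ring,
      PySem.List.pyRange_one_succ_right (by omega), List.foldl_append]
    simp only [List.foldl_cons, List.foldl_nil]
    set dpn := (PySem.List.pyRange 1 ((n : Int) + 1) 1).foldl (outerStepA W) (dpInitL capacity) with hdpn
    set c : Int := (n : Int) + 1 with hc
    have hc0 : 0 < c := by omega
    have hccap : c ≤ capacity := by omega
    have hctoNat : c.toNat = n + 1 := by omega
    have hself : dpn.set c.toNat none = dpn := by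
      apply set_self_of_getD
      rw [hctoNat]; exact hnone (n + 1) (by omega)
    have hinner := innerFold_eq c dpn hc0 (by rw [hlen]; omega) W none hW
    rw [hself] at hinner
    have houter : outerStepA W dpn c = dpn.set c.toNat (partialMin c dpn none W) := hinner
    rw [houter]
    refine ⟨by simp [hlen], ?_, ?_⟩
    · intro v hv
      rcases eq_or_lt_of_le hv with hveq | hvlt
      · -- the new cell
        have hvct : v = c.toNat := by omega
        subst hvct
        rw [getD_set_self _ _ (by rw [hlen]; omega) _ _]
        rw [show ((c.toNat : Nat) : Int) = c by omega]
        apply partialMin_OKo hc0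
        intro u hu0 huc
        have hun : u.toNat ≤ n := by omega
        have := hok u.toNat hun
        rwa [show ((u.toNat : Nat) : Int) = u by omega] at this
      · have hvn : v ≤ n := by omega
        rw [getD_set_ne _ (by omega) _ _]
        exact hok v hvn
    · intro v hv
      rw [getD_set_ne _ (by omega) _ _]
      exact hnone v (by omega)

-- fold a function through List-homomorphic steps (used to read the Array fold as the List fold)
theorem foldl_hom_mem {α β γ : Type} (f : α → β) (g : α → γ → α) (g' : β → γ → β) :
    ∀ (l : List γ) (init : α), (∀ a x, x ∈ l → f (g a x) = g' (f a) x) →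
    f (l.foldl g init) = l.foldl g' (f init) := by
  intro l
  induction l with
  | nil => intro init _; rfl
  | cons x l ih =>
    intro init h
    simp only [List.foldl_cons]
    rw [ih _ (fun a y hy => h a y (by simp [hy])), h init x (by simp)]

theorem toList_aSetD (dp : Array (Option Int)) (i : Int) (v : Option Int) (h : 0 ≤ i) :
    (aSetD dp i v).toList = dp.toList.set i.toNat v := by
  unfold aSetD
  rw [if_pos h, Array.toList_setIfInBounds]

theorem aGetD_eq (dp : Array (Option Int)) (i : Int) (h : 0 ≤ i) :
    aGetD dp i = dp.toList.getD i.toNat none := by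
  unfold aGetD
  rw [if_pos h]
  unfold Array.getD List.getD
  rcases Nat.lt_or_ge i.toNat dp.size with hlt | hge
  · simp [hlt]
  · simp [Nat.not_lt.mpr hge]

theorem A_char {W : List Int} {capacity : Int}
    (hcap : 0 ≤ capacity) (hW : ∀ w ∈ W, 0 ≤ w) :
    (∃ k : Nat, Level W capacity k ∧ unbounded_knapsack_min_items W capacity = (k : Int)) ∨
    ((∀ k, ¬ Reach W capacity k) ∧ unbounded_knapsack_min_items W capacity = -1) := by
  obtain ⟨hlen, hok, -⟩ := outer_invariant hcap hW capacity.toNat (le_refl _)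
  have hN := hok capacity.toNat (le_refl _)
  have hNc : ((capacity.toNat : Int)) = capacity := by omega
  rw [hNc] at hlen hN
  -- the Array fold of the port, seen through toList, is the List fold of the lemmas
  have hsim : ∀ (A : Array (Option Int)),
      ((PySem.List.pyRange 1 (capacity + 1) 1).foldl (fun dp w =>
        W.foldl (fun dp weight =>
          if weight ≤ w then
            aSetD dp w (omin (aGetD dp w) (oplus1 (aGetD dp (w - weight))))
          else dp) dp) A).toList
      = (PySem.List.pyRange 1 (capacity + 1) 1).foldl (outerStepA W) A.toList := by
    intro A
    apply foldl_hom_mem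
    intro a w hw
    have hw1 : 1 ≤ w := (PySem.List.mem_pyRange_one.mp hw).1
    unfold outerStepA
    apply foldl_hom_mem
    intro dp weight _
    unfold innerStepA
    by_cases hcond : weight ≤ w
    · rw [if_pos hcond, if_pos hcond]
      rw [toList_aSetD _ _ _ (by omega), aGetD_eq _ _ (by omega), aGetD_eq _ _ (by omega)]
    · rw [if_neg hcond, if_neg hcond]
  have hdp0 : (aSetD (Array.replicate (capacity + 1).toNat (none : Option Int)) 0 (some 0)).toList
      = dpInitL capacity := by
    rw [toList_aSetD _ _ _ (by omega)]
    unfold dpInitL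
    rw [Array.toList_replicate]
    rfl
  unfold unbounded_knapsack_min_items
  simp only []
  rw [aGetD_eq _ _ hcap, hsim, hdp0]
  rcases hN with ⟨hnone, hnr⟩ | ⟨k, hk, hs⟩
  · right; rw [hnone]; exact ⟨hnr, rfl⟩
  · left; rw [hs]; exact ⟨k, hk, rfl⟩

-- ---------- B side ----------

-- seen[x] as a Bool, for an Int capacity value x
def sG (sn : Array Bool) (x : Int) : Bool := sn.getD x.toNat false

theorem arr_getD_toList {α : Type} (a : Array α) (i : Nat) (d : α) :
    a.getD i d = a.toList.getD i d := by
  unfold Array.getD List.getD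
  rcases Nat.lt_or_ge i a.size with hlt | hge
  · simp [hlt]
  · simp [Nat.not_lt.mpr hge]

theorem sG_replicate (n : Nat) (x : Int) : sG (Array.replicate n false) x = false := by
  unfold sG
  rw [arr_getD_toList, Array.toList_replicate]
  rcases Nat.lt_or_ge x.toNat n with hlt | hge
  · simp [List.getD, hlt]
  · have hlen : (List.replicate n (false : Bool)).length ≤ x.toNat := by simpa using hge
    simp [List.getD, List.getElem?_eq_none hlen]

theorem sG_set (sn : Array Bool) (t x : Int) (ht : 0 ≤ t) (hx : 0 ≤ x)
    (hin : t.toNat < sn.size) :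
    sG (sn.setIfInBounds t.toNat true) x = if x = t then true else sG sn x := by
  unfold sG
  rw [arr_getD_toList, arr_getD_toList, Array.toList_setIfInBounds]
  by_cases hxt : x = t
  · subst hxt
    rw [if_pos rfl, getD_set_self _ _ (by simpa using hin) _ _]
  · rw [if_neg hxt, getD_set_ne _ (by omega) _ _]

theorem bfs_inner_char {cap : Int} (sn0 : Array Bool)
    (hsz0 : sn0.size = cap.toNat + 1) (s : Int) (hs : 0 ≤ s) :
    ∀ (l : List Int) (sn : Array Bool) (out : List Int),
    sn.size = sn0.size →
    (∀ y : Int, 0 ≤ y → sG sn y = (sG sn0 y || decide (y ∈ out))) →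
    ((l.foldl (fun acc w =>
        if 0 < w ∧ s + w ≤ cap ∧ acc.1.getD (s + w).toNat false = false then
          (acc.1.setIfInBounds (s + w).toNat true, (s + w) :: acc.2)
        else acc) (sn, out)).1.size = sn0.size ∧
     (∀ y : Int, 0 ≤ y → sG (l.foldl (fun acc w =>
        if 0 < w ∧ s + w ≤ cap ∧ acc.1.getD (s + w).toNat false = false then
          (acc.1.setIfInBounds (s + w).toNat true, (s + w) :: acc.2)
        else acc) (sn, out)).1 y = (sG sn0 y || decide (y ∈ (l.foldl (fun acc w =>
        if 0 < w ∧ s + w ≤ cap ∧ acc.1.getD (s + w).toNat false = false then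
          (acc.1.setIfInBounds (s + w).toNat true, (s + w) :: acc.2)
        else acc) (sn, out)).2))) ∧
     (∀ x : Int, x ∈ (l.foldl (fun acc w =>
        if 0 < w ∧ s + w ≤ cap ∧ acc.1.getD (s + w).toNat false = false then
          (acc.1.setIfInBounds (s + w).toNat true, (s + w) :: acc.2)
        else acc) (sn, out)).2 ↔
        x ∈ out ∨ ∃ w ∈ l, 0 < w ∧ x = s + w ∧ x ≤ cap ∧ sG sn0 x = false)) := by
  intro l
  induction l with
  | nil =>
    intro sn out hsz hlink
    exact ⟨hsz, hlink, by simp⟩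
  | cons w l ih =>
    intro sn out hsz hlink
    simp only [List.foldl_cons]
    by_cases hcond : 0 < w ∧ s + w ≤ cap ∧ sn.getD (s + w).toNat false = false
    · rw [if_pos hcond]
      have ht0 : 0 ≤ s + w := by omega
      have htf : sG sn (s + w) = false := hcond.2.2
      have hlt : (s + w) ∉ out ∧ sG sn0 (s + w) = false := by
        have := hlink (s + w) ht0
        rw [htf] at this
        constructor
        · intro hmem; simp [hmem] at this
        · cases h0 : sG sn0 (s + w) <;> simp [h0] at this ⊢
      have hin : (s + w).toNat < sn.size := by omega
      have hlink' : ∀ y : Int, 0 ≤ y →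
          sG (sn.setIfInBounds (s + w).toNat true) y
            = (sG sn0 y || decide (y ∈ (s + w) :: out)) := by
        intro y hy
        rw [sG_set sn (s + w) y ht0 hy hin]
        by_cases hyt : y = s + w
        · subst hyt; simp [hlt.2]
        · simp only [List.mem_cons, hyt, false_or]
          exact hlink y hy
      obtain ⟨rsz, rlink, rmem⟩ := ih (sn.setIfInBounds (s + w).toNat true) ((s + w) :: out)
        (by simpa using hsz) hlink'
      refine ⟨rsz, rlink, ?_⟩
      intro x
      rw [rmem x]
      constructor
      · rintro (hx | ⟨w', hw', h1, h2, h3, h4⟩)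
        · rcases List.mem_cons.mp hx with rfl | hx
          · exact Or.inr ⟨w, by simp, hcond.1, rfl, hcond.2.1, hlt.2⟩
          · exact Or.inl hx
        · exact Or.inr ⟨w', by simp [hw'], h1, h2, h3, h4⟩
      · rintro (hx | ⟨w', hw', h1, h2, h3, h4⟩)
        · exact Or.inl (by simp [hx])
        · rcases List.mem_cons.mp hw' with rfl | hw'
          · exact Or.inl (by simp [h2])
          · exact Or.inr ⟨w', hw', h1, h2, h3, h4⟩
    · rw [if_neg hcond]
      obtain ⟨rsz, rlink, rmem⟩ := ih sn out hsz hlink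
      refine ⟨rsz, rlink, ?_⟩
      intro x
      rw [rmem x]
      constructor
      · rintro (hx | ⟨w', hw', h1, h2, h3, h4⟩)
        · exact Or.inl hx
        · exact Or.inr ⟨w', by simp [hw'], h1, h2, h3, h4⟩
      · rintro (hx | ⟨w', hw', h1, h2, h3, h4⟩)
        · exact Or.inl hx
        · rcases List.mem_cons.mp hw' with rfl | hw'
          · -- the head edge was rejected: the only failing conjunct is 'already seen'
            subst h2
            have hseen : sn.getD (s + w').toNat false = true := by
              cases hval : sn.getD (s + w').toNat false
              · exact absurd ⟨h1, h3, hval⟩ hcond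
              · rfl
            have := hlink (s + w') (by omega)
            rw [show sG sn (s + w') = sn.getD (s + w').toNat false from rfl, hseen, h4] at this
            simp at this
            exact Or.inl this
          · exact Or.inr ⟨w', hw', h1, h2, h3, h4⟩

theorem bfs_step_char {W : List Int} {cap : Int} (seen : Array Bool) (F : List Int)
    (hsz : seen.size = cap.toNat + 1) (hFnn : ∀ s ∈ F, 0 ≤ s) :
    (pvBfsStep W cap seen F).1.size = cap.toNat + 1 ∧
    (∀ y : Int, 0 ≤ y →
      sG (pvBfsStep W cap seen F).1 y = (sG seen y || decide (y ∈ (pvBfsStep W cap seen F).2))) ∧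
    (∀ x : Int, x ∈ (pvBfsStep W cap seen F).2 ↔
      ∃ s ∈ F, ∃ w ∈ W, 0 < w ∧ x = s + w ∧ x ≤ cap ∧ sG seen x = false) := by
  have main : ∀ (fs : List Int) (sn : Array Bool) (out : List Int),
      (∀ s ∈ fs, 0 ≤ s) → sn.size = seen.size →
      (∀ y : Int, 0 ≤ y → sG sn y = (sG seen y || decide (y ∈ out))) →
      ((fs.foldl (fun acc s => W.foldl (fun acc w =>
          if 0 < w ∧ s + w ≤ cap ∧ acc.1.getD (s + w).toNat false = false then
            (acc.1.setIfInBounds (s + w).toNat true, (s + w) :: acc.2)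
          else acc) acc) (sn, out)).1.size = seen.size ∧
       (∀ y : Int, 0 ≤ y → sG (fs.foldl (fun acc s => W.foldl (fun acc w =>
          if 0 < w ∧ s + w ≤ cap ∧ acc.1.getD (s + w).toNat false = false then
            (acc.1.setIfInBounds (s + w).toNat true, (s + w) :: acc.2)
          else acc) acc) (sn, out)).1 y
          = (sG seen y || decide (y ∈ (fs.foldl (fun acc s => W.foldl (fun acc w =>
          if 0 < w ∧ s + w ≤ cap ∧ acc.1.getD (s + w).toNat false = false then
            (acc.1.setIfInBounds (s + w).toNat true, (s + w) :: acc.2)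
          else acc) acc) (sn, out)).2))) ∧
       (∀ x : Int, x ∈ (fs.foldl (fun acc s => W.foldl (fun acc w =>
          if 0 < w ∧ s + w ≤ cap ∧ acc.1.getD (s + w).toNat false = false then
            (acc.1.setIfInBounds (s + w).toNat true, (s + w) :: acc.2)
          else acc) acc) (sn, out)).2 ↔
          x ∈ out ∨ ∃ s ∈ fs, ∃ w ∈ W, 0 < w ∧ x = s + w ∧ x ≤ cap ∧ sG seen x = false)) := by
    intro fs
    induction fs with
    | nil =>
      intro sn out _ hsz' hlink
      exact ⟨hsz', hlink, by simp⟩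
    | cons s fs ih =>
      intro sn out hnn hsz' hlink
      simp only [List.foldl_cons]
      obtain ⟨isz, ilink, imem⟩ := bfs_inner_char seen (by omega) s (hnn s (by simp)) W sn out
        (by omega) hlink
      obtain ⟨rsz, rlink, rmem⟩ := ih _ _ (fun x hx => hnn x (by simp [hx])) (by omega) ilink
      refine ⟨rsz, rlink, ?_⟩
      intro x
      rw [rmem x, imem x]
      constructor
      · rintro ((hx | ⟨w, hw, h1, h2, h3, h4⟩) | ⟨s', hs', rest⟩)
        · exact Or.inl hx
        · exact Or.inr ⟨s, by simp, w, hw, h1, h2, h3, h4⟩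
        · exact Or.inr ⟨s', by simp [hs'], rest⟩
      · rintro (hx | ⟨s', hs', rest⟩)
        · exact Or.inl (Or.inl hx)
        · rcases List.mem_cons.mp hs' with rfl | hs'
          · exact Or.inl (Or.inr rest)
          · exact Or.inr ⟨s', hs', rest⟩
  obtain ⟨h1, h2, h3⟩ := main F seen [] hFnn rfl (by intro y _; simp)
  refine ⟨by rw [← hsz]; exact h1, h2, ?_⟩
  intro x
  rw [show ((pvBfsStep W cap seen F).2 : List Int)
      = (F.foldl (fun acc s => W.foldl (fun acc w =>
          if 0 < w ∧ s + w ≤ cap ∧ acc.1.getD (s + w).toNat false = false then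
            (acc.1.setIfInBounds (s + w).toNat true, (s + w) :: acc.2)
          else acc) acc) (seen, ([] : List Int))).2 from rfl, h3 x]
  simp

theorem level_chain {W : List Int} {cap : Int} :
    ∀ (d : Nat) (c : Int) (k : Nat), c ≤ cap → Level W c (k + d) →
    ∃ c', c' ≤ cap ∧ Level W c' k := by
  intro d
  induction d with
  | zero => intro c k hc h; exact ⟨c, hc, h⟩
  | succ d ih =>
    intro c k hc h
    have : Level W c (k + d + 1) := by rw [show k + d + 1 = k + (d+1) by ring]; exact h
    obtain ⟨w, hw, hpos, hlev⟩ := level_pred this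
    exact ih (c - w) k (by omega) hlev

theorem bfs_main {W : List Int} {cap : Int} (hcap : 0 ≤ cap) :
    ∀ (fuel : Nat) (seen : Array Bool) (F : List Int) (k : Nat),
    k ≤ cap.toNat + 1 → fuel = cap.toNat + 2 - k →
    seen.size = cap.toNat + 1 →
    (∀ x, x ∈ F ↔ x ≤ cap ∧ Level W x k) →
    (∀ x : Int, 0 ≤ x → (sG seen x = true ↔ x ≤ cap ∧ ∃ j, j ≤ k ∧ Level W x j)) →
    (∀ j, Level W cap j → k ≤ j) →
    ((∃ j : Nat, Level W cap j ∧ pvBfsLoop W cap fuel seen F (k : Int) = (j : Int)) ∨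
     ((∀ j, ¬ Reach W cap j) ∧ pvBfsLoop W cap fuel seen F (k : Int) = -1)) := by
  intro fuel
  induction fuel with
  | zero => intro seen F k hk hfuel _ _ _ _; omega
  | succ fuel ih =>
    intro seen F k hk hfuel hsz hF hS hcapmin
    rw [pvBfsLoop]
    by_cases hFe : F.isEmpty
    · rw [if_pos hFe]
      right
      refine ⟨?_, rfl⟩
      intro j hj
      obtain ⟨j0, hj0⟩ := exists_level ⟨j, hj⟩
      have hj0k : k ≤ j0 := hcapmin _ hj0
      obtain ⟨c', hc', hlev⟩ := level_chain (j0 - k) cap k (le_refl _)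
        (by rw [show k + (j0 - k) = j0 by omega]; exact hj0)
      have : c' ∈ F := (hF c').mpr ⟨hc', hlev⟩
      rw [List.isEmpty_iff] at hFe
      simp [hFe] at this
    · rw [if_neg hFe]
      by_cases hcapF : F.contains cap
      · rw [if_pos hcapF]
        have hmem : cap ∈ F := by simpa using hcapF
        have hlev := ((hF cap).mp hmem).2
        left
        exact ⟨k, hlev, rfl⟩
      · rw [if_neg hcapF]
        simp only []
        have hcapnot : ¬ cap ∈ F := by
          intro h; exact hcapF (by simpa using h)
        have hnotlev : ¬ Level W cap k := fun h => hcapnot ((hF cap).mpr ⟨le_refl _, h⟩)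
        have hcapmin' : ∀ j, Level W cap j → k + 1 ≤ j := by
          intro j hj
          have := hcapmin j hj
          rcases eq_or_lt_of_le this with rfl | h
          · exact absurd hj hnotlev
          · omega
        have hkcap : k ≤ cap.toNat := by
          rw [List.isEmpty_iff] at hFe
          obtain ⟨x, hx⟩ := List.exists_mem_of_ne_nil F hFe
          obtain ⟨hxc, hxl⟩ := (hF x).mp hx
          have h1 : (k : Int) ≤ x := reach_le hxl.1
          omega
        have hFnn : ∀ s ∈ F, 0 ≤ s := fun s hsF => reach_nonneg ((hF s).mp hsF).2.1
        obtain ⟨rsz, rlink, rmem⟩ := bfs_step_char (W := W) (cap := cap) seen F hsz hFnn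
        have hnxt : ∀ x : Int, x ∈ (pvBfsStep W cap seen F).2 ↔ x ≤ cap ∧ Level W x (k + 1) := by
          intro x
          rw [rmem x]
          constructor
          · rintro ⟨s, hsF, w, hw, hpos, rfl, hle, hunseen⟩
            obtain ⟨hscap, hslev⟩ := (hF s).mp hsF
            have hs0 : 0 ≤ s := reach_nonneg hslev.1
            have hreach : Reach W (s + w) (k + 1) :=
              reach_succ_iff.mpr ⟨w, hw, hpos, by simpa using hslev.1⟩
            obtain ⟨j0, hj0⟩ := exists_level ⟨k + 1, hreach⟩
            have hj0le : j0 ≤ k + 1 := hj0.2 _ hreach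
            rcases eq_or_lt_of_le hj0le with rfl | hltj
            · exact ⟨hle, hj0⟩
            · have : sG seen (s + w) = true :=
                (hS (s + w) (by omega)).mpr ⟨hle, j0, by omega, hj0⟩
              rw [hunseen] at this
              exact absurd this (by simp)
          · rintro ⟨hxcap, hxlev⟩
            have hx0 : 0 ≤ x := reach_nonneg hxlev.1
            obtain ⟨w, hw, hpos, hlev⟩ := level_pred hxlev
            refine ⟨x - w, (hF (x - w)).mpr ⟨by omega, hlev⟩, w, hw, hpos, by ring_nf, by omega, ?_⟩
            cases hval : sG seen x
            · rfl
            · obtain ⟨_, j, hjk, hjlev⟩ := (hS x hx0).mp hval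
              have := level_unique hjlev hxlev
              omega
        have hF' : ∀ x, x ∈ (pvBfsStep W cap seen F).2.reverse ↔ x ≤ cap ∧ Level W x (k + 1) := by
          intro x
          rw [List.mem_reverse]
          exact hnxt x
        have hS' : ∀ x : Int, 0 ≤ x →
            (sG (pvBfsStep W cap seen F).1 x = true ↔
              x ≤ cap ∧ ∃ j, j ≤ k + 1 ∧ Level W x j) := by
          intro x hx0
          rw [rlink x hx0]
          simp only [Bool.or_eq_true, decide_eq_true_eq]
          constructor
          · rintro (h | h)
            · obtain ⟨h1, j, hj, hl⟩ := (hS x hx0).mp h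
              exact ⟨h1, j, by omega, hl⟩
            · obtain ⟨h1, hl⟩ := (hnxt x).mp h
              exact ⟨h1, k + 1, le_refl _, hl⟩
          · rintro ⟨h1, j, hj, hl⟩
            rcases Nat.lt_or_ge j (k + 1) with hltj | hgej
            · exact Or.inl ((hS x hx0).mpr ⟨h1, j, by omega, hl⟩)
            · have : j = k + 1 := by omega
              subst this
              exact Or.inr ((hnxt x).mpr ⟨h1, hl⟩)
        have := ih (pvBfsStep W cap seen F).1 (pvBfsStep W cap seen F).2.reverse (k + 1)
          (by omega) (by omega) rsz hF' hS' hcapmin'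
        rw [show ((k : Int) + 1) = (((k + 1 : Nat) : Nat) : Int) by push_cast; ring]
        exact this

theorem B_char {W : List Int} {capacity : Int} (hcap : 0 ≤ capacity) :
    (∃ k : Nat, Level W capacity k ∧ unbounded_knapsack_min_items_alt W capacity = (k : Int)) ∨
    ((∀ k, ¬ Reach W capacity k) ∧ unbounded_knapsack_min_items_alt W capacity = -1) := by
  unfold unbounded_knapsack_min_items_alt
  rw [if_neg (by omega : ¬ capacity < 0)]
  rw [show (0 : Int) = ((0 : Nat) : Int) from rfl]
  apply bfs_main hcap (capacity.toNat + 2) _ [0] 0 (by omega) (by omega)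
    (by simp)
  · intro x
    simp only [List.mem_singleton]
    constructor
    · rintro rfl; exact ⟨hcap, level_zero⟩
    · rintro ⟨_, hl⟩; exact level_zero_iff.mp hl
  · intro x hx0
    have hseen : sG ((Array.replicate (capacity.toNat + 1) false).setIfInBounds 0 true) x
        = if x = 0 then true else false := by
      rw [show (0 : Nat) = (0 : Int).toNat from rfl,
        sG_set _ 0 x (le_refl _) hx0 (by simp)]
      rw [sG_replicate]
    rw [hseen]
    constructor
    · intro h
      by_cases hx : x = 0
      · subst hx; exact ⟨hcap, 0, le_refl _, level_zero⟩
      · rw [if_neg hx] at h; exact absurd h (by simp)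
    · rintro ⟨hxc, j, hj, hl⟩
      have hj0 : j = 0 := by omega
      subst hj0
      rw [if_pos (level_zero_iff.mp hl)]
  · intro j _; omega

-- ---------- the capacity = 0 case, where A never enters its loop ----------

theorem A_zero (W : List Int) : unbounded_knapsack_min_items W 0 = 0 := by
  unfold unbounded_knapsack_min_items
  rw [PySem.List.pyRange_one_eq_nil (by omega)]
  simp only [List.foldl_nil]
  rfl

theorem B_zero (W : List Int) : unbounded_knapsack_min_items_alt W 0 = 0 := by
  rfl

-- ===== VERDICT (by name: the statement is the Claim_ definition above) =====
theorem unbounded_knapsack_min_items_spec : Claim_equal_unbounded_knapsack_min_items := by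
  intro W capacity _ hpre
  obtain ⟨hcap, hrest⟩ := hpre
  unfold Spec_unbounded_knapsack_min_items
  rcases hrest with rfl | hW
  · rw [A_zero, B_zero]
  · rcases A_char hcap hW with ⟨k, hk, hA⟩ | ⟨hnr, hA⟩
    · rcases B_char (W := W) hcap with ⟨k', hk', hB⟩ | ⟨hnr', hB⟩
      · rw [hA, hB, level_unique hk hk']
      · exact absurd hk.1 (hnr' k)
    · rcases B_char (W := W) hcap with ⟨k', hk', hB⟩ | ⟨_, hB⟩
      · exact absurd hk'.1 (hnr k')
      · rw [hA, hB]
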